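-- pv_equiv track=rewrite | github.com/ShantanuJhaveri/LM-Intro_ML | AppofML_ITP449/Code_repo/hw2_files/HW2_Q3_Shantanu_Jhaveri.py | passCase
-- ===== SOURCE A (Python) =====
-- def passCase(password):
--     passwordArray = []
--     for i in password:
--         if i.isupper():
--             passwordArray.append(1)
--         if i.islower():
--             passwordArray.append(0)
--     if 1 not in passwordArray or 0 not in passwordArray:
--         return False
--     else:
--         return True
-- ===== SOURCE B (Python) =====
-- def passCase(password):
--     # A password has both cases iff case-folding changes it in both directions:
--     # lower() changes it iff it contains an uppercase letter, upper() iff a lowercase one.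
--     return password != password.lower() and password != password.upper()
-- ===== Notes on version B (the rewrite author's own statement) =====
-- stated objective: idiomatic
-- what changed: Instead of scanning characters with predicates, B compares the whole string with its lower()- and upper()-folded images: lower() changes the string iff it contains an uppercase letter and upper() iff a lowercase one, so no per-character loop or marker list exists in B.
import Mathlib
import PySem

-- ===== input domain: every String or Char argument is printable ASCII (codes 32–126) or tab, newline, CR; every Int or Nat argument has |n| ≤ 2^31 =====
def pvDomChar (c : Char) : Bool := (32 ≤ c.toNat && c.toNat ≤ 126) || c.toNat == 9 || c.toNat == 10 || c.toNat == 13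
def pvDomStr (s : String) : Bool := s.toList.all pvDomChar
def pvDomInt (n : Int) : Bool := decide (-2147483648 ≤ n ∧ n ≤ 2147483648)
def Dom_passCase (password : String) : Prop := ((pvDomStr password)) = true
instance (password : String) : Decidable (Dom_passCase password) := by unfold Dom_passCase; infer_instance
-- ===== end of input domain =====

-- B drops A's per-character scan and marker list: it compares the string with its
-- lower()- and upper()-folded images (objective: idiomatic).

-- ===== PORT A =====
def passCase (password : String) : Bool :=
  let passwordArray : List Int := password.toList.foldl (fun arr i =>
    let arr := if PySem.Chars.isupper i then arr ++ [(1 : Int)] else arr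
    if PySem.Chars.islower i then arr ++ [(0 : Int)] else arr) []
  if ¬ ((1 : Int) ∈ passwordArray) ∨ ¬ ((0 : Int) ∈ passwordArray) then false else true

-- ===== PORT B =====
def passCase_alt (password : String) : Bool :=
  (password != PySem.Str.lower password) && (password != PySem.Str.upper password)

-- ===== PRECONDITION & SPEC =====
def Spec_passCase (password : String) (out : Bool) : Prop := out = passCase_alt password
instance (password : String) (out : Bool) : Decidable (Spec_passCase password out) := by unfold Spec_passCase; infer_instance

-- ===== CLAIM (what is proved, stated in full; the proofs are below) =====
def Claim_equal_passCase : Prop := ∀ (password : String), Dom_passCase password → Spec_passCase password (passCase password)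

-- ===== LEMMAS AND PROOFS =====

-- the fold's marker list contains 1 iff some char is upper, and 0 iff some is lower (relative to the accumulator)
theorem pv_fold_mem (l : List Char) (acc : List Int) (m : Int) :
    (m ∈ l.foldl (fun arr i =>
      let arr := if PySem.Chars.isupper i then arr ++ [(1 : Int)] else arr
      if PySem.Chars.islower i then arr ++ [(0 : Int)] else arr) acc) ↔
    (m ∈ acc ∨ (m = 1 ∧ l.any (fun c => PySem.Chars.isupper c)) ∨ (m = 0 ∧ l.any (fun c => PySem.Chars.islower c))) := by
  induction l generalizing acc with
  | nil => simp
  | cons c l ih =>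
    simp only [List.foldl_cons, ih, List.any_cons]
    by_cases hu : PySem.Chars.isupper c <;> by_cases hl : PySem.Chars.islower c <;>
      simp [hu, hl, List.mem_append] <;> aesop

-- a map fixes a list exactly when it fixes every element
theorem pv_map_fix (f : Char → Char) (l : List Char) : l.map f = l ↔ ∀ c ∈ l, f c = c := by
  induction l with
  | nil => simp
  | cons a t ih =>
    simp only [List.map_cons, List.cons.injEq, List.mem_cons, ih]
    constructor
    · rintro ⟨h1, h2⟩ c (rfl | hc)
      · exact h1
      · exact h2 c hc
    · intro h
      exact ⟨h a (Or.inl rfl), fun c hc => h c (Or.inr hc)⟩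

-- lowering fixes a character exactly when it is not an uppercase letter
theorem pv_lowerChar_fix (c : Char) : PySem.Chars.lowerChar c = c ↔ PySem.Chars.isupper c = false := by
  unfold PySem.Chars.lowerChar
  by_cases h : PySem.Chars.isupper c = true
  · have hb : ('A' ≤ c ∧ c ≤ 'Z') := by
      have := h; unfold PySem.Chars.isupper at this; simpa using this
    have hz : 65 ≤ c.toNat ∧ c.toNat ≤ 90 := by
      rcases hb with ⟨h1, h2⟩; rw [Char.le_def] at h1 h2; exact ⟨h1, h2⟩
    have hvalid : Nat.isValidChar (c.toNat + 32) := by left; omega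
    simp only [h, if_true]
    constructor
    · intro heq
      have ht : (Char.ofNat (c.toNat + 32)).toNat = c.toNat := by rw [heq]
      rw [Char.toNat_ofNat, if_pos hvalid] at ht
      omega
    · intro hfalse; cases hfalse
  · simp only [Bool.not_eq_true] at h
    simp [h]

-- uppering fixes a character exactly when it is not a lowercase letter
theorem pv_upperChar_fix (c : Char) : PySem.Chars.upperChar c = c ↔ PySem.Chars.islower c = false := by
  unfold PySem.Chars.upperChar
  by_cases h : PySem.Chars.islower c = true
  · have hb : ('a' ≤ c ∧ c ≤ 'z') := by
      have := h; unfold PySem.Chars.islower at this; simpa using this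
    have hz : 97 ≤ c.toNat ∧ c.toNat ≤ 122 := by
      rcases hb with ⟨h1, h2⟩; rw [Char.le_def] at h1 h2; exact ⟨h1, h2⟩
    have hvalid : Nat.isValidChar (c.toNat - 32) := by left; omega
    simp only [h, if_true]
    constructor
    · intro heq
      have ht : (Char.ofNat (c.toNat - 32)).toNat = c.toNat := by rw [heq]
      rw [Char.toNat_ofNat, if_pos hvalid] at ht
      omega
    · intro hfalse; cases hfalse
  · simp only [Bool.not_eq_true] at h
    simp [h]

-- the string changes under lower() iff some character is uppercase
theorem pv_ne_lower (s : String) :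
    (s != PySem.Str.lower s) = s.toList.any (fun c => PySem.Chars.isupper c) := by
  by_cases h : (s.toList.any fun c => PySem.Chars.isupper c) = true
  · rw [h]
    rcases List.any_eq_true.mp h with ⟨c, hc, hup⟩
    have hne : PySem.Chars.lower s.toList ≠ s.toList := by
      intro heq
      unfold PySem.Chars.lower at heq
      have hfix : PySem.Chars.lowerChar c = c := (pv_map_fix _ _).mp heq c hc
      rw [(pv_lowerChar_fix c).mp hfix] at hup
      cases hup
    rw [bne_iff_ne]
    intro heq
    apply hne
    have h2 := congrArg String.toList heq
    rw [PySem.Str.toList_lower] at h2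
    exact h2.symm
  · rw [Bool.not_eq_true] at h
    rw [h]
    have heq : PySem.Chars.lower s.toList = s.toList := by
      unfold PySem.Chars.lower
      rw [pv_map_fix]
      intro c hc
      exact (pv_lowerChar_fix c).mpr (Bool.not_eq_true _ ▸ (List.any_eq_false.mp h c hc) : _)
    rw [bne_eq_false_iff_eq]
    rw [← String.toList_inj, PySem.Str.toList_lower]
    exact heq.symm

-- the string changes under upper() iff some character is lowercase
theorem pv_ne_upper (s : String) :
    (s != PySem.Str.upper s) = s.toList.any (fun c => PySem.Chars.islower c) := by
  by_cases h : (s.toList.any fun c => PySem.Chars.islower c) = true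
  · rw [h]
    rcases List.any_eq_true.mp h with ⟨c, hc, hlo⟩
    have hne : PySem.Chars.upper s.toList ≠ s.toList := by
      intro heq
      unfold PySem.Chars.upper at heq
      have hfix : PySem.Chars.upperChar c = c := (pv_map_fix _ _).mp heq c hc
      rw [(pv_upperChar_fix c).mp hfix] at hlo
      cases hlo
    rw [bne_iff_ne]
    intro heq
    apply hne
    have h2 := congrArg String.toList heq
    rw [PySem.Str.toList_upper] at h2
    exact h2.symm
  · rw [Bool.not_eq_true] at h
    rw [h]
    have heq : PySem.Chars.upper s.toList = s.toList := by
      unfold PySem.Chars.upper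
      rw [pv_map_fix]
      intro c hc
      exact (pv_upperChar_fix c).mpr (Bool.not_eq_true _ ▸ (List.any_eq_false.mp h c hc) : _)
    rw [bne_eq_false_iff_eq]
    rw [← String.toList_inj, PySem.Str.toList_upper]
    exact heq.symm

-- ===== VERDICT (by name: the statement is the Claim_ definition above) =====
theorem passCase_spec : Claim_equal_passCase := by
  intro password _
  show passCase password = passCase_alt password
  unfold passCase passCase_alt
  rw [pv_ne_lower, pv_ne_upper]
  simp only [pv_fold_mem, List.not_mem_nil, false_or]
  by_cases h1 : (password.toList.any fun c => PySem.Chars.isupper c) = true <;>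
    by_cases h0 : (password.toList.any fun c => PySem.Chars.islower c) = true <;>
      simp [h1, h0]
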